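-- pv_equiv track=rewrite | github.com/holynekk/Competitive-Programming | Leet_Code/Number_of_Laser_Beams_in_a_Bank.py | numberOfBeams
-- ===== SOURCE A (Python) =====
-- from typing import List
--
-- def numberOfBeams(bank: List[str]) -> int:
--     cur = 0
--     prev = 0
--     total = 0
--     for i in range(len(bank)):
--         cur = 0
--         for j in range(len(bank[0])):
--             if bank[i][j] == '1':
--                 cur += 1
--         if cur:
--             total += cur * prev
--             prev = cur
--     return total
-- ===== SOURCE B (Python) =====
-- from typing import List
--
-- def numberOfBeams(bank: List[str]) -> int:
--     if not bank:
--         return 0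
--     w = len(bank[0])
--     counts = [row[:w].count('1') for row in bank]
--     n = len(bank)
--     total = 0
--     for i in range(n):
--         if counts[i]:
--             for j in range(i + 1, n):
--                 if counts[j]:
--                     total += counts[i] * counts[j]
--                     break
--     return total
-- ===== Notes on version B (the rewrite author's own statement) =====
-- stated objective: alternative
-- what changed: Instead of A's single stateful pass threading a running prev accumulator, B first builds a per-row count table and then, for each non-empty row, scans forward for its nearest non-empty successor row (nested loop with break) and adds the product of the two counts; correctness follows because each beam pair is exactly a non-empty row together with the next non-empty row below it.
import Mathlib
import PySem

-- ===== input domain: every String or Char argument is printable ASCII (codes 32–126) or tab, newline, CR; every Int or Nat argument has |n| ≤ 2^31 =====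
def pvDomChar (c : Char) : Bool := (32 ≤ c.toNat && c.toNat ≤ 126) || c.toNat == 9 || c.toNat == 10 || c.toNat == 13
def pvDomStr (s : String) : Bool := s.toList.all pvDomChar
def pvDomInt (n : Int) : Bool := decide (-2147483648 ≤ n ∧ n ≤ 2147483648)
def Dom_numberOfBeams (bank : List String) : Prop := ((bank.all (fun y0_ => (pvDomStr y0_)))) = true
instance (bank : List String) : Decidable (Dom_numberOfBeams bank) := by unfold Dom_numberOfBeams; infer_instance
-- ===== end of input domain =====

-- B replaces A's stateful cur/prev/total pass by a per-row count table plus, for each non-empty row, a forward search for its nearest non-empty successor (nested scan with break): a different traversal of the rows, same cost.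


-- ===== PORT A =====
def numberOfBeams (bank : List String) : Int :=
  -- cur is reset to 0 at the top of every iteration of A's loop, so it is a per-iteration local here
  let st :=
    (PySem.List.pyRange 0 bank.length 1).foldl
      (fun (s : Int × Int) i =>
        let row := PySem.List.pyGetD bank i ""
        let cur :=
          (PySem.List.pyRange 0 (PySem.Str.len (PySem.List.pyGetD bank 0 "")) 1).foldl
            (fun (c : Int) j => if PySem.Str.pyGet? row j = some '1' then c + 1 else c) 0
        if cur ≠ 0 then (cur, s.2 + cur * s.1) else s)
      (0, 0)
  st.2

-- ===== PORT B =====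
-- B's inner 'for j in range(i+1, n): if counts[j]: total += ci*cj; break' loop (break = stop at first hit)
def pvInnerB (counts : List Int) (ci total : Int) : List Int → Int
  | [] => total
  | j :: js =>
      if PySem.List.pyGetD counts j 0 ≠ 0 then total + ci * PySem.List.pyGetD counts j 0
      else pvInnerB counts ci total js

def numberOfBeams_alt (bank : List String) : Int :=
  if bank = [] then 0
  else
    let w := PySem.Str.len (bank.headD "")
    let counts := bank.map (fun row => (PySem.Str.count (PySem.Str.slice row none (some w)) "1" : Int))
    let n : Int := bank.length
    (PySem.List.pyRange 0 n 1).foldl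
      (fun (total : Int) i =>
        if PySem.List.pyGetD counts i 0 ≠ 0 then
          pvInnerB counts (PySem.List.pyGetD counts i 0) total (PySem.List.pyRange (i + 1) n 1)
        else total) 0

-- ===== PRECONDITION & SPEC =====
-- Pre_ admits exactly the inputs A returns on: every row at least as long as the first
-- (A indexes every row at columns 0..len(bank[0])-1 and raises IndexError on a shorter row).
def Pre_numberOfBeams (bank : List String) : Prop :=
  ∀ r ∈ bank, PySem.Str.len (bank.headD "") ≤ PySem.Str.len r
instance (bank : List String) : Decidable (Pre_numberOfBeams bank) := by
  unfold Pre_numberOfBeams; infer_instance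
def pvWitness_numberOfBeams : List String := ["011", "000", "010"]
def Spec_numberOfBeams (bank : List String) (out : Int) : Prop := out = numberOfBeams_alt bank
instance (bank : List String) (out : Int) : Decidable (Spec_numberOfBeams bank out) := by unfold Spec_numberOfBeams; infer_instance

-- ===== CLAIM (what is proved, stated in full; the proofs are below) =====
def Claim_equal_numberOfBeams : Prop := ∀ (bank : List String), Dom_numberOfBeams bank → Pre_numberOfBeams bank → Spec_numberOfBeams bank (numberOfBeams bank)

-- ===== LEMMAS AND PROOFS =====

-- sum of products of adjacent elements
def pvPairSum : List Int → Int
  | a :: b :: r => a * b + pvPairSum (b :: r)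
  | _ => 0

-- first nonzero element of a list (0 if none): the value B's inner forward search finds
def pvFirstNz : List Int → Int
  | [] => 0
  | c :: t => if c ≠ 0 then c else pvFirstNz t

-- structural restatement of B's outer loop on the counts list
def pvFsum : List Int → Int
  | [] => 0
  | c :: t => (if c ≠ 0 then c * pvFirstNz t else 0) + pvFsum t

theorem pvPairSum_zero_cons (l : List Int) : pvPairSum (0 :: l) = pvPairSum l := by
  cases l with
  | nil => rfl
  | cons b r => simp [pvPairSum]

-- counting '1' by Chars.count.go (sub = ['1']) is List.count
theorem pvCountGo (fuel : Nat) (l : List Char) (acc : Nat) (h : l.length ≤ fuel) :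
    PySem.Chars.count.go ['1'] fuel l acc = acc + l.count '1' := by
  induction fuel generalizing l acc with
  | zero =>
    interval_cases hl : l.length
    · simp at hl; subst hl; simp [PySem.Chars.count.go]
  | succ n ih =>
    cases l with
    | nil => simp [PySem.Chars.count.go]
    | cons c t =>
      simp only [PySem.Chars.count.go]
      by_cases hc : c = '1'
      · subst hc
        simp only [List.isPrefixOf, BEq.rfl, Bool.true_and, if_true]
        rw [show List.drop (['1'] : List Char).length ('1' :: t) = t from rfl,
          ih t (acc + 1) (by simpa using h)]
        simp; omega
      · have : (['1'] : List Char).isPrefixOf (c :: t) = false := by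
          simp [List.isPrefixOf]; intro hcc; exact absurd hcc.symm hc
        rw [this]
        simp only [Bool.false_eq_true, if_false]
        rw [ih t acc (by simpa using h)]
        simp [hc]

theorem pvStrCount_eq (s : String) : PySem.Str.count s "1" = s.toList.count '1' := by
  simp only [PySem.Str.count]
  show PySem.Chars.count s.toList ['1'] = _
  simp only [PySem.Chars.count, List.isEmpty_cons, Bool.false_eq_true, if_false]
  simpa using pvCountGo s.toList.length s.toList 0 le_rfl

-- A's inner loop over columns 0..w-1 counts '1' among the first w characters
theorem pvInner_take (row : String) (w : Nat) (h : w ≤ row.toList.length) :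
    (PySem.List.pyRange 0 (w : Int) 1).foldl
      (fun (c : Int) j => if PySem.Str.pyGet? row j = some '1' then c + 1 else c) 0
    = ((row.toList.take w).count '1' : Int) := by
  have hlen : ((row.toList.take w).length : Int) = (w : Int) := by
    simp only [List.length_take]; omega
  rw [← hlen]
  have hcongr :
      (PySem.List.pyRange 0 ((row.toList.take w).length : Int) 1).foldl
        (fun (c : Int) j => if PySem.Str.pyGet? row j = some '1' then c + 1 else c) 0
      = (PySem.List.pyRange 0 ((row.toList.take w).length : Int) 1).foldl
        (fun (c : Int) j => if (PySem.List.pyGetD (row.toList.take w) j ' ') = '1' then c + 1 else c) 0 := by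
    apply PySem.List.foldl_congr_mem
    intro c j hj
    have hmem := (PySem.List.mem_pyRange_one.mp hj)
    have h0 : (0:Int) ≤ j := hmem.1
    have h1 : j < ((row.toList.take w).length : Int) := hmem.2
    have hjn : j.toNat < (row.toList.take w).length := by omega
    have hjn' : j.toNat < row.toList.length :=
      lt_of_lt_of_le hjn (List.take_sublist _ _).length_le
    have hget : PySem.Str.pyGet? row j = PySem.List.pyGet? row.toList j := by
      simp [PySem.Str.pyGet?]
    rw [hget, PySem.List.pyGet?_of_nonneg row.toList h0,
      PySem.List.pyGetD_eq_getElem (row.toList.take w) ' ' h0 h1]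
    simp [List.getElem?_eq_getElem hjn', List.getElem_take]
  rw [hcongr, PySem.List.foldl_pyRange_zero_pyGetD' (row.toList.take w) ' '
    (fun (c : Int) ch => if ch = '1' then c + 1 else c) 0]
  have := PySem.List.foldl_beq_add_one (l := row.toList.take w) (v := '1') (a := (0:Int))
  simpa [beq_iff_eq] using this

-- slicing a string to its first w characters, on the character-list side
theorem pvSliceTake (row : String) (w : Nat) :
    (PySem.Str.slice row none (some (w : Int))).toList = row.toList.take w := by
  simp [PySem.Str.slice, PySem.List.slice_to_natCast]

-- A's outer fold (on the counts level) accumulates pvPairSum of the nonzero counts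
theorem pvOuter_eq (cs : List Int) (prev total : Int) :
    (cs.foldl (fun (s : Int × Int) c => if c ≠ 0 then (c, s.2 + c * s.1) else s) (prev, total)).2
    = total + pvPairSum (prev :: cs.filter (fun c => c ≠ 0)) := by
  induction cs generalizing prev total with
  | nil => simp [pvPairSum]
  | cons c t ih =>
    by_cases h : c = 0
    · subst h; simpa using ih prev total
    · simp only [List.foldl_cons, List.filter_cons, h, ne_eq, not_false_iff, if_true]
      rw [ih c (total + c * prev)]
      simp [pvPairSum]; ring

-- A's result as the pairSum of the nonzero truncated per-row counts
theorem pvA_eq (bank : List String) (hpre : Pre_numberOfBeams bank) :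
    numberOfBeams bank
    = pvPairSum ((bank.map (fun r => ((r.toList.take (bank.headD "").toList.length).count '1' : Int))).filter (fun c => c ≠ 0)) := by
  unfold numberOfBeams
  rw [PySem.List.foldl_pyRange_zero_pyGetD' bank ""
    (fun (s : Int × Int) row =>
      let cur :=
        (PySem.List.pyRange 0 (PySem.Str.len (PySem.List.pyGetD bank 0 "")) 1).foldl
          (fun (c : Int) j => if PySem.Str.pyGet? row j = some '1' then c + 1 else c) 0
      if cur ≠ 0 then (cur, s.2 + cur * s.1) else s)
    ((0 : Int), (0 : Int))]
  have hw0 : PySem.List.pyGetD bank 0 "" = bank.headD "" := by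
    cases bank with
    | nil => rfl
    | cons h t => rw [PySem.List.pyGetD_zero_cons]; rfl
  have hstep : bank.foldl
      (fun (s : Int × Int) row =>
        let cur :=
          (PySem.List.pyRange 0 (PySem.Str.len (PySem.List.pyGetD bank 0 "")) 1).foldl
            (fun (c : Int) j => if PySem.Str.pyGet? row j = some '1' then c + 1 else c) 0
        if cur ≠ 0 then (cur, s.2 + cur * s.1) else s) ((0 : Int), (0 : Int))
      = bank.foldl
        (fun (s : Int × Int) row =>
          let c : Int := ((row.toList.take (bank.headD "").toList.length).count '1' : Int)
          if c ≠ 0 then (c, s.2 + c * s.1) else s) ((0 : Int), (0 : Int)) := by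
    apply PySem.List.foldl_congr_mem
    intro s row hrow
    have hle : (bank.headD "").toList.length ≤ row.toList.length := by
      have := hpre row hrow
      simp only [PySem.Str.len_eq] at this
      exact_mod_cast this
    have hwcast : PySem.Str.len (PySem.List.pyGetD bank 0 "")
        = (((bank.headD "").toList.length : Nat) : Int) := by
      rw [hw0]; simp [PySem.Str.len_eq]
    rw [hwcast, pvInner_take row _ hle]
  rw [hstep]
  have hfold : bank.foldl
      (fun (s : Int × Int) row =>
        let c : Int := ((row.toList.take (bank.headD "").toList.length).count '1' : Int)
        if c ≠ 0 then (c, s.2 + c * s.1) else s) ((0 : Int), (0 : Int))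
      = (bank.map (fun r => ((r.toList.take (bank.headD "").toList.length).count '1' : Int))).foldl
          (fun (s : Int × Int) c => if c ≠ 0 then (c, s.2 + c * s.1) else s) ((0 : Int), (0 : Int)) := by
    rw [List.foldl_map]
  show (bank.foldl
      (fun (s : Int × Int) row =>
        let c : Int := ((row.toList.take (bank.headD "").toList.length).count '1' : Int)
        if c ≠ 0 then (c, s.2 + c * s.1) else s) ((0 : Int), (0 : Int))).2 = _
  rw [hfold, pvOuter_eq, pvPairSum_zero_cons]
  omega

-- ===== B-side lemmas =====

-- B's inner forward search on the index range k..n-1 finds the first nonzero count in drop k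
theorem pvInnerB_range (cs : List Int) (ci total : Int) (k : Nat) :
    pvInnerB cs ci total (PySem.List.pyRange (k : Int) (cs.length : Int) 1)
    = total + ci * pvFirstNz (cs.drop k) := by
  by_cases hk : k < cs.length
  · rw [PySem.List.pyRange_one_cons (by exact_mod_cast hk)]
    have hdrop : cs.drop k = cs[k] :: cs.drop (k + 1) := List.drop_eq_getElem_cons hk
    have hget : PySem.List.pyGetD cs (k : Int) 0 = cs[k] := by
      rw [PySem.List.pyGetD_eq_getElem cs 0 (by positivity) (by exact_mod_cast hk)]
      simp
    simp only [pvInnerB, hget]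
    rw [hdrop]
    by_cases hz : cs[k] ≠ 0
    · rw [if_pos hz, pvFirstNz, if_pos hz]
    · have hz0 : cs[k] = 0 := not_not.mp hz
      have hc : ((k : Int) + 1) = ((k + 1 : Nat) : Int) := by push_cast; ring
      rw [if_neg (by simpa using hz0), hc, pvInnerB_range cs ci total (k + 1)]
      simp [pvFirstNz, hz0]
  · have h1 : PySem.List.pyRange (k : Int) (cs.length : Int) 1 = [] := by
      simp [PySem.List.pyRange]; omega
    have h2 : cs.drop k = [] := List.drop_eq_nil_of_le (by omega)
    simp [h1, h2, pvInnerB, pvFirstNz]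
termination_by cs.length - k

-- B's outer fold from index k accumulates pvFsum of drop k
theorem pvOuterB_range (cs : List Int) (total : Int) (k : Nat) :
    (PySem.List.pyRange (k : Int) (cs.length : Int) 1).foldl
      (fun (total : Int) i =>
        if PySem.List.pyGetD cs i 0 ≠ 0 then
          pvInnerB cs (PySem.List.pyGetD cs i 0) total (PySem.List.pyRange (i + 1) (cs.length : Int) 1)
        else total) total
    = total + pvFsum (cs.drop k) := by
  by_cases hk : k < cs.length
  · rw [PySem.List.pyRange_one_cons (by exact_mod_cast hk)]
    have hdrop : cs.drop k = cs[k] :: cs.drop (k + 1) := List.drop_eq_getElem_cons hk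
    have hget : PySem.List.pyGetD cs (k : Int) 0 = cs[k] := by
      rw [PySem.List.pyGetD_eq_getElem cs 0 (by positivity) (by exact_mod_cast hk)]
      simp
    have hc : ((k : Int) + 1) = ((k + 1 : Nat) : Int) := by push_cast; ring
    simp only [List.foldl_cons, hget]
    rw [hdrop]
    by_cases hz : cs[k] ≠ 0
    · rw [if_pos hz, hc, pvInnerB_range cs cs[k] total (k + 1),
        pvOuterB_range cs (total + cs[k] * pvFirstNz (cs.drop (k + 1))) (k + 1)]
      simp only [pvFsum, if_pos hz]
      ring
    · have hz0 : cs[k] = 0 := not_not.mp hz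
      rw [if_neg (by simpa using hz0), hc, pvOuterB_range cs total (k + 1)]
      simp [pvFsum, hz0]
  · have h1 : PySem.List.pyRange (k : Int) (cs.length : Int) 1 = [] := by
      simp [PySem.List.pyRange]; omega
    have h2 : cs.drop k = [] := List.drop_eq_nil_of_le (by omega)
    simp [h1, h2, pvFsum]
termination_by cs.length - k

-- B's outer fold over the whole index range 0..n-1
theorem pvOuterB_zero (cs : List Int) (total : Int) :
    (PySem.List.pyRange 0 (cs.length : Int) 1).foldl
      (fun (total : Int) i =>
        if PySem.List.pyGetD cs i 0 ≠ 0 then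
          pvInnerB cs (PySem.List.pyGetD cs i 0) total (PySem.List.pyRange (i + 1) (cs.length : Int) 1)
        else total) total
    = total + pvFsum cs := by
  simpa using pvOuterB_range cs total 0

-- the forward search finds the head of the nonzero-filtered tail
theorem pvFirstNz_eq (cs : List Int) :
    pvFirstNz cs = (cs.filter (fun c => c ≠ 0)).headD 0 := by
  induction cs with
  | nil => rfl
  | cons c t ih =>
    by_cases h : c = 0 <;> simp [pvFirstNz, h, ih]

-- nearest-neighbor products sum to the adjacent-pair sum of the nonzero counts
theorem pvFsum_eq (cs : List Int) :
    pvFsum cs = pvPairSum (cs.filter (fun c => c ≠ 0)) := by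
  induction cs with
  | nil => rfl
  | cons c t ih =>
    by_cases h : c = 0
    · simp [pvFsum, h, ih]
    · simp only [pvFsum, List.filter_cons, h, ne_eq, not_false_iff, if_true,
        decide_true, ih, pvFirstNz_eq]
      cases hft : t.filter (fun c => c ≠ 0) with
      | nil => simp [pvPairSum]
      | cons b r => simp [pvPairSum]

-- B's result as the pairSum of the nonzero truncated per-row counts
theorem pvB_eq (bank : List String) (hb : bank ≠ []) :
    numberOfBeams_alt bank
    = pvPairSum ((bank.map (fun r => ((r.toList.take (bank.headD "").toList.length).count '1' : Int))).filter (fun c => c ≠ 0)) := by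
  unfold numberOfBeams_alt
  rw [if_neg hb]
  have hw : PySem.Str.len (bank.headD "") = (((bank.headD "").toList.length : Nat) : Int) := by
    simp [PySem.Str.len_eq]
  have hcnt : (fun (row : String) =>
      (PySem.Str.count (PySem.Str.slice row none (some (PySem.Str.len (bank.headD "")))) "1" : Int))
      = (fun (row : String) => ((row.toList.take (bank.headD "").toList.length).count '1' : Int)) := by
    funext row
    simp only [hw, pvStrCount_eq, pvSliceTake]
  show (PySem.List.pyRange 0 (bank.length : Int) 1).foldl _ 0 = _
  have hlen : (bank.length : Int)
      = ((bank.map (fun row => (PySem.Str.count (PySem.Str.slice row none (some (PySem.Str.len (bank.headD "")))) "1" : Int))).length : Int) := by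
    simp
  rw [hlen, pvOuterB_zero (bank.map (fun row => (PySem.Str.count (PySem.Str.slice row none (some (PySem.Str.len (bank.headD "")))) "1" : Int))) 0]
  simp only [pvFsum_eq, hcnt, zero_add]

-- ===== VERDICT (by name: the statement is the Claim_ definition above) =====
theorem numberOfBeams_spec : Claim_equal_numberOfBeams := by
  intro bank _ hpre
  show numberOfBeams bank = numberOfBeams_alt bank
  by_cases hb : bank = []
  · subst hb; rfl
  · rw [pvA_eq bank hpre, pvB_eq bank hb]
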